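-- pv_equiv track=rewrite | github.com/maegpi/AoC_2020 | day_4/silver_day_4.py | checkPerson
-- ===== SOURCE A (Python) =====
-- def checkPerson(person):
--     byr = 0
--     iyr = 0
--     eyr = 0
--     hgt = 0
--     hcl = 0
--     ecl = 0
--     pid = 0
--
--     tempStr = ""
--     person = person.replace("\n"," ")
--     person = person.split(":")
--     for cell in person:
--         tempStr += cell
--     person = tempStr.split(" ")
--     for cell in person:
--         if cell[0:3] == "byr":
--             byr = 1
--         if cell[0:3] == "iyr":
--             iyr = 1
--         if cell[0:3] == "eyr":
--             eyr = 1
--         if cell[0:3] == "hgt":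
--             hgt = 1
--         if cell[0:3] == "hcl":
--             hcl = 1
--         if cell[0:3] == "ecl":
--             ecl = 1
--         if cell[0:3] == "pid":
--             pid = 1
--
--     return byr+iyr+eyr+hgt+hcl+ecl+pid
-- ===== SOURCE B (Python) =====
-- def checkPerson(person):
--     keyset = ("byr", "iyr", "eyr", "hgt", "hcl", "ecl", "pid")
--     tempStr = ""
--     person = person.replace("\n", " ")
--     for cell in person.split(":"):
--         tempStr += cell
--     cells = tempStr.split(" ")
--     return sum(1 for k in keyset if any(cell[0:3] == k for cell in cells))
-- ===== Notes on version B (the rewrite author's own statement) =====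
-- stated objective: simpler
-- what changed: Replaces the seven flag variables and seven per-token if-branches with a key-outer count: for each of the seven keys, scan the tokens for a matching 3-char prefix and sum the hits; preprocessing is kept byte-for-byte.
import Mathlib
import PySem

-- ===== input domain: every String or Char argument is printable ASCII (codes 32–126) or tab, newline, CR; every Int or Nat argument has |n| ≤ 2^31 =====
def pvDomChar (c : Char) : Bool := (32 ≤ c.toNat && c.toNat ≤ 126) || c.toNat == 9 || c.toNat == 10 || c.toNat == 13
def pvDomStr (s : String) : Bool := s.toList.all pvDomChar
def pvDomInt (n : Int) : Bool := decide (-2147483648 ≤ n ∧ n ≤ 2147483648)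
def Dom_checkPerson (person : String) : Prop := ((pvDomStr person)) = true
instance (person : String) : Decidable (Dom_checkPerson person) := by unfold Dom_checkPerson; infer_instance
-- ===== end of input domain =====

-- B keeps A's preprocessing but replaces the token loop with seven flag variables by a
-- key-outer count: for each of the seven keys, scan the tokens once (objective: simpler).

-- ===== PORT A =====
-- A's token loop: one pass over the cells, seven independent flags set by seven ifs.
def checkLoopA : List (List Char) → Int → Int → Int → Int → Int → Int → Int → Int
  | [], byr, iyr, eyr, hgt, hcl, ecl, pid => byr + iyr + eyr + hgt + hcl + ecl + pid
  | cell :: rest, byr, iyr, eyr, hgt, hcl, ecl, pid =>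
      checkLoopA rest
        (if PySem.List.slice cell (some 0) (some 3) == "byr".toList then 1 else byr)
        (if PySem.List.slice cell (some 0) (some 3) == "iyr".toList then 1 else iyr)
        (if PySem.List.slice cell (some 0) (some 3) == "eyr".toList then 1 else eyr)
        (if PySem.List.slice cell (some 0) (some 3) == "hgt".toList then 1 else hgt)
        (if PySem.List.slice cell (some 0) (some 3) == "hcl".toList then 1 else hcl)
        (if PySem.List.slice cell (some 0) (some 3) == "ecl".toList then 1 else ecl)
        (if PySem.List.slice cell (some 0) (some 3) == "pid".toList then 1 else pid)

def checkPerson (person : String) : Int :=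
  let person1 := PySem.Chars.replace person.toList "\n".toList " ".toList
  let parts := PySem.Chars.splitOn person1 ":".toList
  let tempStr := parts.foldl (fun acc cell => acc ++ cell) ([] : List Char)
  let cells := PySem.Chars.splitOn tempStr " ".toList
  checkLoopA cells 0 0 0 0 0 0 0

-- ===== PORT B =====
def pvKeyset : List (List Char) :=
  ["byr".toList, "iyr".toList, "eyr".toList, "hgt".toList, "hcl".toList, "ecl".toList, "pid".toList]

def checkPerson_alt (person : String) : Int :=
  let person1 := PySem.Chars.replace person.toList "\n".toList " ".toList
  let parts := PySem.Chars.splitOn person1 ":".toList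
  let tempStr := parts.foldl (fun acc cell => acc ++ cell) ([] : List Char)
  let cells := PySem.Chars.splitOn tempStr " ".toList
  pvKeyset.foldl
    (fun acc k =>
      if cells.any (fun cell => PySem.List.slice cell (some 0) (some 3) == k) then acc + 1 else acc)
    (0 : Int)

-- ===== PRECONDITION & SPEC =====
def Spec_checkPerson (person : String) (out : Int) : Prop := out = checkPerson_alt person
instance (person : String) (out : Int) : Decidable (Spec_checkPerson person out) := by unfold Spec_checkPerson; infer_instance

-- ===== CLAIM (what is proved, stated in full; the proofs are below) =====
def Claim_equal_checkPerson : Prop := ∀ (person : String), Dom_checkPerson person → Spec_checkPerson person (checkPerson person)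

-- ===== LEMMAS AND PROOFS =====

def pvFlag (cells : List (List Char)) (k : List Char) (s : Int) : Int :=
  if cells.any (fun cell => PySem.List.slice cell (some 0) (some 3) == k) then 1 else s

theorem pvIfOr (a b : Prop) [Decidable a] [Decidable b] (s : Int) :
    (if a ∨ b then (1 : Int) else s) = if b then 1 else if a then 1 else s := by
  split_ifs <;> first | rfl | (exfalso; tauto)

theorem pvFlag_cons (cell : List Char) (rest : List (List Char)) (k : List Char) (s : Int) :
    pvFlag (cell :: rest) k s =
      pvFlag rest k (if PySem.List.slice cell (some 0) (some 3) == k then 1 else s) := by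
  simp only [pvFlag, List.any_cons, Bool.or_eq_true]
  exact pvIfOr _ _ _

theorem checkLoopA_eq (cells : List (List Char)) :
    ∀ (b i e h hc ec p : Int),
      checkLoopA cells b i e h hc ec p =
        pvFlag cells "byr".toList b + pvFlag cells "iyr".toList i + pvFlag cells "eyr".toList e +
        pvFlag cells "hgt".toList h + pvFlag cells "hcl".toList hc + pvFlag cells "ecl".toList ec +
        pvFlag cells "pid".toList p := by
  induction cells with
  | nil => intro b i e h hc ec p; simp [checkLoopA, pvFlag]
  | cons cell rest ih =>
      intro b i e h hc ec p
      simp only [checkLoopA, ih, pvFlag_cons]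

theorem pvStep (acc : Int) (c : Prop) [Decidable c] :
    (if c then acc + 1 else acc) = acc + (if c then 1 else 0) := by
  split_ifs <;> omega

theorem count_eq (cells : List (List Char)) :
    checkLoopA cells 0 0 0 0 0 0 0 =
      pvKeyset.foldl
        (fun acc k =>
          if cells.any (fun cell => PySem.List.slice cell (some 0) (some 3) == k) then acc + 1 else acc)
        (0 : Int) := by
  rw [checkLoopA_eq]
  simp only [pvKeyset, List.foldl, pvStep, pvFlag]
  split_ifs <;> omega

theorem checkPerson_eq_alt (person : String) : checkPerson person = checkPerson_alt person := by
  unfold checkPerson checkPerson_alt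
  exact count_eq _

-- ===== VERDICT (by name: the statement is the Claim_ definition above) =====
theorem checkPerson_spec : Claim_equal_checkPerson := by
  intro person _
  exact checkPerson_eq_alt person
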